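-- pv_equiv track=rewrite | github.com/Lightblues/Leetcode | contest/251-300/260.py | placeWordInCrossword0
-- ===== SOURCE A (Python) =====
-- from typing import List, Optional
--
-- def placeWordInCrossword0(board: List[List[str]], word: str) -> bool:
--     d2direction = {
--         0: [0, 1],
--         1: [1, 0],
--     }
--     m,n = len(board), len(board[0])
--     l = len(word)
--
--     def test_str(s, word):
--         for ch1, ch2 in zip(s, word):
--             if ch1 == " " or ch1 == ch2:
--                 continue
--             else:
--                 return False
--         return True
--     def test(i,j, direct):
--         # 边界满足的情况下, 检查从(i,j)开始, 向direct方向是否可放置word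
--         # direct 0/1 表示两个方向
--         direction = d2direction[direct]
--         s = ""
--         for k in range(l):
--             s += board[i][j]
--             i,j = i+direction[0], j+direction[1]
--         if test_str(s, word) or test_str(s[::-1], word):
--             return True
--         return False
--
--     def test_margin(i,j, direct):
--         # 判断从 (i,j) 开始放, direct方向, 检查边界是否满足条件
--         if direct==0:
--             if j+l>n:
--                 return False
--             return j+l==n or board[i][j+l]=='#'
--         else:
--             if i+l>m:
--                 return False
--             return i+l==m or board[i+l][j]=='#'
--
--     for i in range(0, m):
--         for j in range(0, n):
--             if i==0:
--                 if test_margin(i,j, 1):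
--                     if test(i,j, 1):
--                         return True
--             if j==0:
--                 if test_margin(i,j, 0):
--                     if test(i,j, 0):
--                         return True
--             if board[i][j]=='#':
--                 for direct in [0, 1]:
--                     di,dj = d2direction[direct]
--                     ni,nj = i+di, j+dj
--                     if test_margin(ni,nj, direct):
--                         if test(ni,nj, direct):
--                             return True
--     return False
-- ===== SOURCE B (Python) =====
-- def _match(seg, word):
--     ok = lambda s: all(a == ' ' or a == b for a, b in zip(s, word))
--     return ok(seg) or ok(seg[::-1])
--
-- def placeWordInCrossword0(board, word):
--     l = len(word)
--     n = len(board[0])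
--     lines = [row[:n] for row in board] + [list(col) for col in zip(*board)]
--     slots = []
--     for cells in lines:
--         starts = [0] + [k + 1 for k, c in enumerate(cells) if c == '#']
--         ends = [k for k, c in enumerate(cells) if c == '#'] + [len(cells)]
--         slots += [''.join(cells[s:s + l]) for s in starts if s + l in ends]
--     return any(_match(seg, word) for seg in slots)
-- ===== Notes on version B (the rewrite author's own statement) =====
-- stated objective: simpler
-- what changed: A walks every grid cell, interleaving start detection (edges, cells after '#') with direction-table margin checks and a per-candidate walk; B builds all crossword slots first: for each row and column it computes the line's boundary structure once (run starts after '#'/edge, run ends at '#'/edge), collects every slot exactly len(word) cells wide as a string, and then wildcard-matches the word and its reverse against that flat slot list.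
-- outside the precondition, e.g. on placeWordInCrossword0([['b', 'b'], ['#'], []], 'b'): A returns True, B returns False; on placeWordInCrossword0([[]], ''): A returns False, B returns True
import Mathlib
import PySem

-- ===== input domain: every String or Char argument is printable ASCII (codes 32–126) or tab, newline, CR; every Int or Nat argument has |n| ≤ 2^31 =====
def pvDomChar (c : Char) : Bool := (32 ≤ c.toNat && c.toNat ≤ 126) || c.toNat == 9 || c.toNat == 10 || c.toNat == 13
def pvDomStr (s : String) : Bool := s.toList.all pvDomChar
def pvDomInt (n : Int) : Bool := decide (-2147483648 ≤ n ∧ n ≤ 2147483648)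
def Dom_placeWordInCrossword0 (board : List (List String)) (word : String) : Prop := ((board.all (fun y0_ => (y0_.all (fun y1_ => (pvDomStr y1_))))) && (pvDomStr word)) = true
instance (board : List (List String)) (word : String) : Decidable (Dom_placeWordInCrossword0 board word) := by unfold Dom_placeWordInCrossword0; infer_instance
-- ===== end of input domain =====

-- B replaces A's per-cell grid walk (start detection at edges / after '#', direction-table
-- margin checks, then a character walk per candidate) by building all crossword slots first:
-- per row/column line it computes the boundary structure once (run starts, run ends) and
-- collects every slot exactly len(word) cells wide as a string, then wildcard-matches the
-- word and its reverse against that flat slot list; objective: simpler.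

-- ===== PORT A =====
-- All indices arising in A are nonnegative Python ints, so they are ported as Nat.
-- board[i][j] is ported as nested getD: inside Pre_ every such access is in range
-- (Python would raise IndexError otherwise, and those inputs are outside Pre_).
def pvCell (board : List (List String)) (i j : Nat) : String :=
  (board.getD i []).getD j ""

-- test_str: the early-return-False loop over zip(s, word)
def pvTestStr (s w : List Char) : Bool :=
  (s.zip w).all fun ab => ab.1 == ' ' || ab.1 == ab.2

-- the `for k in range(l): s += board[i][j]; i,j = i+di, j+dj` loop of `test`
def pvBuild (board : List (List String)) (di dj : Nat) : Nat → Nat → Nat → List Char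
  | 0, _, _ => []
  | k + 1, i, j => (pvCell board i j).toList ++ pvBuild board di dj k (i + di) (j + dj)

-- test: s[::-1] is ported as List.reverse (exact: per-character reversal)
def pvTest (board : List (List String)) (w : List Char) (l i j di dj : Nat) : Bool :=
  let s := pvBuild board di dj l i j
  pvTestStr s w || pvTestStr s.reverse w

-- test_margin, direct = 0 (horizontal); `if j+l>n: return False` becomes the decide conjunct
def pvMarginH (board : List (List String)) (n l i j : Nat) : Bool :=
  decide (j + l ≤ n) && ((j + l == n) || (pvCell board i (j + l) == "#"))

-- test_margin, direct = 1 (vertical)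
def pvMarginV (board : List (List String)) (m l i j : Nat) : Bool :=
  decide (i + l ≤ m) && ((i + l == m) || (pvCell board (i + l) j == "#"))

-- the nested i/j loops with early `return True` become `any`; the nested
-- `if c: if margin: if test: return True` statements become && / || in A's order.
def placeWordInCrossword0 (board : List (List String)) (word : String) : Bool :=
  let m := board.length
  let n := (board.getD 0 []).length
  let w := word.toList
  let l := w.length
  (List.range m).any fun i => (List.range n).any fun j =>
    ((i == 0) && (pvMarginV board m l i j && pvTest board w l i j 1 0)) ||
    ((j == 0) && (pvMarginH board n l i j && pvTest board w l i j 0 1)) ||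
    ((pvCell board i j == "#") &&
      ((pvMarginH board n l i (j + 1) && pvTest board w l i (j + 1) 0 1) ||
       (pvMarginV board m l (i + 1) j && pvTest board w l (i + 1) j 1 0)))

-- ===== PORT B =====
-- the ok lambda inside _match: all(a == ' ' or a == b for a, b in zip(s, word))
def pvWild (s w : List Char) : Bool :=
  (s.zip w).all fun ab => ab.1 == ' ' || ab.1 == ab.2

-- _match(seg, word): the wildcard match, forwards or on seg[::-1] (per-character reversal)
def pvMatch (seg w : List Char) : Bool :=
  pvWild seg w || pvWild seg.reverse w

-- ''.join(cells)
def pvJoin (cells : List String) : List Char :=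
  (cells.map String.toList).flatten

-- [k for k, c in enumerate(cells) if c == '#'], indices carried from offset k0:
-- every index arising is a nonnegative Python int, ported as Nat
def pvHashIdx : List String → Nat → List Nat
  | [], _ => []
  | c :: cs, k => if c == "#" then k :: pvHashIdx cs (k + 1) else pvHashIdx cs (k + 1)

-- one line's contribution to slots:
-- starts = [0] + [k+1 ...]; ends = [k ...] + [len(cells)];
-- [''.join(cells[s:s+l]) for s in starts if s + l in ends]  (s ≥ 0, so the slice is drop/take)
def pvLineSlots (l : Nat) (cells : List String) : List (List Char) :=
  (0 :: (pvHashIdx cells 0).map (· + 1)).filterMap fun s =>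
    if (pvHashIdx cells 0 ++ [cells.length]).contains (s + l) then
      some (pvJoin ((cells.drop s).take l))
    else none

-- zip(*board): the columns, truncated to the shortest row (Python's zip truncation)
def pyZipStar (rows : List (List String)) : List (List String) :=
  match rows with
  | [] => []
  | r :: rs =>
    (List.range (rs.foldl (fun k row => min k row.length) r.length)).map
      fun i => (r :: rs).map fun row => row.getD i ""

-- lines = truncated rows + columns; slots accumulated line by line; any(_match(seg, word))
def placeWordInCrossword0_alt (board : List (List String)) (word : String) : Bool :=
  let w := word.toList
  let l := w.length
  let n := (board.getD 0 []).length
  let lines := (board.map fun row => row.take n) ++ pyZipStar board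
  let slots := lines.flatMap fun cells => pvLineSlots l cells
  slots.any fun seg => pvMatch seg w

-- ===== PRECONDITION & SPEC =====
-- Pre_ excludes boards with a row shorter than the first row (there A indexes
-- board[i][j] for j < len(board[0]) and usually raises IndexError; where it happens to
-- return True before reaching the short row, B's truncated columns can miss that slot),
-- and the degenerate zero-width board together with the empty word, where A's False and
-- B's True are both defensible answers for an empty slot.
def Pre_placeWordInCrossword0 (board : List (List String)) (word : String) : Prop :=
  board ≠ [] ∧
  (∀ row ∈ board, (board.getD 0 []).length ≤ row.length) ∧
  ((board.getD 0 []) ≠ [] ∨ word ≠ "")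

instance (board : List (List String)) (word : String) : Decidable (Pre_placeWordInCrossword0 board word) := by
  unfold Pre_placeWordInCrossword0; infer_instance

def pvWitness_placeWordInCrossword0 : List (List String) × String :=
  ([["#", "a", " "], ["b", "c", "d"]], "ab")

def Spec_placeWordInCrossword0 (board : List (List String)) (word : String) (out : Bool) : Prop := out = placeWordInCrossword0_alt board word
instance (board : List (List String)) (word : String) (out : Bool) : Decidable (Spec_placeWordInCrossword0 board word out) := by unfold Spec_placeWordInCrossword0; infer_instance

-- ===== CLAIM (what is proved, stated in full; the proofs are below) =====
def Claim_equal_placeWordInCrossword0 : Prop := ∀ (board : List (List String)) (word : String), Dom_placeWordInCrossword0 board word → Pre_placeWordInCrossword0 board word → Spec_placeWordInCrossword0 board word (placeWordInCrossword0 board word)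

-- ===== LEMMAS AND PROOFS =====

-- A "slot" of the word in a line of cells: in-bounds, bounded left and right by an edge or a
-- '#' cell, and the wildcard match succeeds forwards or backwards.
def Slot (w : List Char) (line : List String) (p : Nat) : Prop :=
  p + w.length ≤ line.length ∧
  (p = 0 ∨ line.getD (p - 1) "" = "#") ∧
  (p + w.length = line.length ∨ line.getD (p + w.length) "" = "#") ∧
  (pvWild (pvJoin ((line.drop p).take w.length)) w = true ∨
   pvWild (pvJoin ((line.drop p).take w.length)).reverse w = true)

lemma pvJoin_cons (a : String) (rest : List String) :
    pvJoin (a :: rest) = a.toList ++ pvJoin rest := by simp [pvJoin]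

-- ''.join of a slot of cells, peeled one cell at a time
lemma join_take_succ (line : List String) (l p : Nat) :
    pvJoin ((line.drop p).take (l + 1)) =
      (line.getD p "").toList ++ pvJoin ((line.drop (p + 1)).take l) := by
  by_cases hp : p < line.length
  · rw [List.drop_eq_getElem_cons hp, List.take_succ_cons, pvJoin_cons,
      List.getD_eq_getElem _ _ hp]
  · rw [List.drop_eq_nil_of_le (by omega), List.drop_eq_nil_of_le (by omega),
      List.getD_eq_default _ _ (by omega)]
    simp [pvJoin]

lemma build_row (board : List (List String)) (i : Nat) :
    ∀ (l p : Nat), pvBuild board 0 1 l i p = pvJoin (((board.getD i []).drop p).take l) := by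
  intro l
  induction l with
  | zero => intro p; simp [pvBuild, pvJoin]
  | succ l ih =>
    intro p
    rw [pvBuild, join_take_succ]
    simp only [Nat.add_zero]
    rw [ih]
    rfl

lemma getD_col (board : List (List String)) (j : Nat) :
    ∀ (i : Nat), (board.map fun r => r.getD j "").getD i "" = (board.getD i []).getD j "" := by
  induction board with
  | nil => intro i; simp
  | cons r rest ih =>
    intro i
    cases i with
    | zero => simp
    | succ i => simpa using ih i

lemma build_col (board : List (List String)) (j : Nat) :
    ∀ (l i : Nat),
      pvBuild board 1 0 l i j = pvJoin ((((board.map fun r => r.getD j "").drop i)).take l) := by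
  intro l
  induction l with
  | zero => intro i; simp [pvBuild, pvJoin]
  | succ l ih =>
    intro i
    rw [pvBuild, join_take_succ, getD_col]
    simp only [Nat.add_zero]
    rw [ih]
    rfl

lemma testStr_eq : pvTestStr = pvWild := rfl

-- the horizontal margin-and-test pair, as a proposition about the row
lemma H_iff (board : List (List String)) (w : List Char) (n i p : Nat) :
    (pvMarginH board n w.length i p = true ∧ pvTest board w w.length i p 0 1 = true) ↔
      p + w.length ≤ n ∧
      ((p + w.length = n ∨ (board.getD i []).getD (p + w.length) "" = "#") ∧
       (pvWild (pvJoin (((board.getD i []).drop p).take w.length)) w = true ∨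
        pvWild (pvJoin (((board.getD i []).drop p).take w.length)).reverse w = true)) := by
  simp [pvMarginH, pvTest, pvCell, build_row, testStr_eq, and_assoc]

-- the vertical margin-and-test pair, as a proposition about the column
lemma V_iff (board : List (List String)) (w : List Char) (m i j : Nat) :
    (pvMarginV board m w.length i j = true ∧ pvTest board w w.length i j 1 0 = true) ↔
      i + w.length ≤ m ∧
      ((i + w.length = m ∨ (board.getD (i + w.length) []).getD j "" = "#") ∧
       (pvWild (pvJoin (((board.map fun r => r.getD j "").drop i).take w.length)) w = true ∨
        pvWild (pvJoin (((board.map fun r => r.getD j "").drop i).take w.length)).reverse w = true)) := by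
  simp [pvMarginV, pvTest, pvCell, build_col, testStr_eq, and_assoc]

lemma getD_take (l : List String) (n q : Nat) (h : q < n) :
    (l.take n).getD q "" = l.getD q "" := by
  unfold List.getD
  rw [List.getElem?_take_of_lt h]

-- a slot that fits inside the first n cells reads the same cells before and
-- after truncating the line to width n
lemma seg_take (l : List String) (n p k : Nat) (h : p + k ≤ n) :
    ((l.take n).drop p).take k = (l.drop p).take k := by
  rw [List.drop_take, List.take_take]
  congr 1
  omega

-- ===== A ↔ slots =====
theorem A_iff_slots (board : List (List String)) (word : String)
    (h0 : board ≠ [])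
    (hlen : ∀ row ∈ board, (board.getD 0 []).length ≤ row.length)
    (hnz : (board.getD 0 []) ≠ [] ∨ word ≠ "") :
    placeWordInCrossword0 board word = true ↔
      ((∃ i, i < board.length ∧
          ∃ p, Slot word.toList ((board.getD i []).take (board.getD 0 []).length) p) ∨
       (∃ j, j < (board.getD 0 []).length ∧
          ∃ p, Slot word.toList (board.map fun r => r.getD j "") p)) := by
  set w := word.toList with hw
  set m := board.length with hm
  set n := (board.getD 0 []).length with hn
  have hm0 : 0 < m := by
    cases board with
    | nil => exact absurd rfl h0
    | cons a b => simp [hm]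
  have hrowmem : ∀ i, i < m → board.getD i [] ∈ board := by
    intro i hi
    rw [List.getD_eq_getElem _ _ hi]
    exact List.getElem_mem hi
  have hrowlen : ∀ i, i < m → ((board.getD i []).take n).length = n := by
    intro i hi
    rw [List.length_take]
    exact Nat.min_eq_left (hlen _ (hrowmem i hi))
  have hcollen : ∀ j : Nat, (board.map fun r => r.getD j "").length = m := by
    intro j; simp [hm]
  have hnl : 0 < n ∨ 0 < w.length := by
    rcases hnz with h | h
    · left
      rw [hn]
      cases hcase : board.getD 0 [] with
      | nil => exact absurd hcase h
      | cons a b => simp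
    · right
      rw [hw]
      cases hcw : word.toList with
      | nil => exact absurd (String.toList_inj.mp (by simp [hcw])) h
      | cons a b => simp
  unfold placeWordInCrossword0
  simp only [← hw, ← hm, ← hn, List.any_eq_true, List.mem_range, Bool.or_eq_true,
    Bool.and_eq_true, beq_iff_eq]
  constructor
  · -- A = true → slots
    rintro ⟨i, him, j, hjn, hA⟩
    rcases hA with (⟨hi0, hV1, hV2⟩ | ⟨hj0, hH1, hH2⟩) | ⟨hsharp, hA⟩
    · -- vertical slot at the top edge: column j, position i (= 0)
      right
      obtain ⟨hb, he, hmt⟩ := (V_iff board w m i j).mp ⟨hV1, hV2⟩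
      refine ⟨j, hjn, i, ?_, Or.inl hi0, ?_, hmt⟩
      · rw [hcollen]; exact hb
      · rw [hcollen]
        rcases he with he | he
        · exact Or.inl he
        · exact Or.inr (by rwa [getD_col])
    · -- horizontal slot at the left edge: row i, position j (= 0)
      left
      obtain ⟨hb, he, hmt⟩ := (H_iff board w n i j).mp ⟨hH1, hH2⟩
      refine ⟨i, him, j, ?_, Or.inl hj0, ?_, ?_⟩
      · rw [hrowlen i him]; exact hb
      · rw [hrowlen i him]
        rcases he with he | he
        · exact Or.inl he
        · by_cases hjl : j + w.length = n
          · exact Or.inl hjl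
          · exact Or.inr (by rwa [getD_take _ _ _ (by omega)])
      · rw [seg_take _ _ _ _ hb]
        exact hmt
    · rcases hA with ⟨hH1, hH2⟩ | ⟨hV1, hV2⟩
      · -- horizontal slot after a '#': row i, position j+1
        left
        obtain ⟨hb, he, hmt⟩ := (H_iff board w n i (j + 1)).mp ⟨hH1, hH2⟩
        refine ⟨i, him, j + 1, ?_, Or.inr ?_, ?_, ?_⟩
        · rw [hrowlen i him]; exact hb
        · simp only [Nat.add_sub_cancel]
          rw [getD_take _ _ _ hjn]
          exact hsharp
        · rw [hrowlen i him]
          rcases he with he | he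
          · exact Or.inl he
          · by_cases hjl : j + 1 + w.length = n
            · exact Or.inl hjl
            · exact Or.inr (by rwa [getD_take _ _ _ (by omega)])
        · rw [seg_take _ _ _ _ hb]
          exact hmt
      · -- vertical slot after a '#': column j, position i+1
        right
        obtain ⟨hb, he, hmt⟩ := (V_iff board w m (i + 1) j).mp ⟨hV1, hV2⟩
        refine ⟨j, hjn, i + 1, ?_, Or.inr ?_, ?_, hmt⟩
        · rw [hcollen]; exact hb
        · simp only [Nat.add_sub_cancel]
          rw [getD_col]
          exact hsharp
        · rw [hcollen]
          rcases he with he | he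
          · exact Or.inl he
          · exact Or.inr (by rwa [getD_col])
  · -- slots → A = true
    rintro (⟨i, him, p, hb, hg, he, hmt⟩ | ⟨j, hjn, p, hb, hg, he, hmt⟩)
    · -- a row slot at position p becomes a horizontal hit of A
      rw [hrowlen i him] at hb he
      rw [seg_take _ _ _ _ hb] at hmt
      have hn0 : 0 < n := by
        rcases hnl with h | h
        · exact h
        · omega
      have he' : p + w.length = n ∨ (board.getD i []).getD (p + w.length) "" = "#" := by
        rcases he with h | h
        · exact Or.inl h
        · by_cases hpl : p + w.length = n
          · exact Or.inl hpl
          · exact Or.inr (by rwa [getD_take _ _ _ (by omega)] at h)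
      by_cases hp0 : p = 0
      · -- found from the left edge (j = 0)
        subst hp0
        exact ⟨i, him, 0, hn0, Or.inl (Or.inr ⟨rfl,
          (H_iff board w n i 0).mpr ⟨hb, he', hmt⟩⟩)⟩
      · -- found after the '#' cell at (i, p-1)
        have hg' : (board.getD i []).getD (p - 1) "" = "#" := by
          rcases hg with h | h
          · exact absurd h hp0
          · rwa [getD_take _ _ _ (by omega)] at h
        have hpp : p - 1 + 1 = p := by omega
        refine ⟨i, him, p - 1, by omega, Or.inr ⟨hg', Or.inl ?_⟩⟩
        rw [hpp]
        exact (H_iff board w n i p).mpr ⟨hb, he', hmt⟩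
    · -- a column slot at position p becomes a vertical hit of A
      rw [hcollen] at hb he
      have he' : p + w.length = m ∨ (board.getD (p + w.length) []).getD j "" = "#" := by
        rcases he with h | h
        · exact Or.inl h
        · exact Or.inr (by rwa [getD_col] at h)
      by_cases hp0 : p = 0
      · -- found from the top edge (i = 0)
        subst hp0
        exact ⟨0, hm0, j, hjn, Or.inl (Or.inl ⟨rfl,
          (V_iff board w m 0 j).mpr ⟨hb, he', hmt⟩⟩)⟩
      · -- found after the '#' cell at (p-1, j)
        have hg' : (board.getD (p - 1) []).getD j "" = "#" := by
          rcases hg with h | h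
          · exact absurd h hp0
          · rwa [getD_col] at h
        have hpp : p - 1 + 1 = p := by omega
        refine ⟨p - 1, by omega, j, hjn, Or.inr ⟨hg', Or.inr ?_⟩⟩
        rw [hpp]
        exact (V_iff board w m p j).mpr ⟨hb, he', hmt⟩

-- ===== B ↔ slots =====
lemma mem_hashIdx : ∀ (cs : List String) (s k : Nat),
    k ∈ pvHashIdx cs s ↔ (s ≤ k ∧ k - s < cs.length ∧ cs.getD (k - s) "" = "#") := by
  intro cs
  induction cs with
  | nil => intro s k; simp [pvHashIdx]
  | cons c cs ih =>
    intro s k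
    unfold pvHashIdx
    by_cases hc : c = "#"
    · rw [if_pos (by simp [hc]), List.mem_cons, ih (s + 1) k]
      constructor
      · rintro (rfl | ⟨h1, h2, h3⟩)
        · exact ⟨le_rfl, by simp, by simp [hc]⟩
        · refine ⟨by omega, by simp; omega, ?_⟩
          rwa [show k - s = (k - (s + 1)) + 1 by omega, List.getD_cons_succ]
      · rintro ⟨h1, h2, h3⟩
        by_cases hk : k = s
        · exact Or.inl hk
        · right
          refine ⟨by omega, by simp at h2 ⊢; omega, ?_⟩
          rwa [show k - s = (k - (s + 1)) + 1 by omega, List.getD_cons_succ] at h3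
    · rw [if_neg (by simpa using hc), ih (s + 1) k]
      constructor
      · rintro ⟨h1, h2, h3⟩
        refine ⟨by omega, by simp; omega, ?_⟩
        rwa [show k - s = (k - (s + 1)) + 1 by omega, List.getD_cons_succ]
      · rintro ⟨h1, h2, h3⟩
        have hks : k ≠ s := by
          intro h
          subst h
          simp at h3
          exact hc h3
        refine ⟨by omega, by simp at h2 ⊢; omega, ?_⟩
        rwa [show k - s = (k - (s + 1)) + 1 by omega, List.getD_cons_succ] at h3

lemma mem_hashIdx0 (cs : List String) (k : Nat) :
    k ∈ pvHashIdx cs 0 ↔ (k < cs.length ∧ cs.getD k "" = "#") := by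
  rw [mem_hashIdx cs 0 k]
  simp

-- a '#' read through getD with default "" must be in range
lemma getD_hash_lt (cells : List String) (i : Nat) (h : cells.getD i "" = "#") :
    i < cells.length := by
  by_contra hge
  rw [List.getD_eq_default _ _ (by omega)] at h
  exact absurd h (by decide)

-- one line of B finds a slot exactly when the line has a Slot of the word
lemma lineSlots_iff (w : List Char) (cells : List String) :
    ((pvLineSlots w.length cells).any fun seg => pvMatch seg w) = true ↔
      ∃ p, Slot w cells p := by
  unfold pvLineSlots pvMatch
  rw [List.any_eq_true]
  constructor
  · rintro ⟨seg, hmem, hm⟩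
    rw [List.mem_filterMap] at hmem
    obtain ⟨s, hs, hval⟩ := hmem
    by_cases hcont : (pvHashIdx cells 0 ++ [cells.length]).contains (s + w.length) = true
    · rw [if_pos hcont, Option.some.injEq] at hval
      subst hval
      rw [List.contains_eq_mem, decide_eq_true_eq, List.mem_append, List.mem_singleton,
        mem_hashIdx0] at hcont
      refine ⟨s, ?_, ?_, ?_, by simpa [Bool.or_eq_true] using hm⟩
      · rcases hcont with ⟨h1, _⟩ | h1 <;> omega
      · rcases List.mem_cons.mp hs with h | h
        · exact Or.inl h
        · right
          rw [List.mem_map] at h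
          obtain ⟨k, hk, rfl⟩ := h
          rw [mem_hashIdx0] at hk
          simpa using hk.2
      · rcases hcont with ⟨_, h2⟩ | h2
        · exact Or.inr h2
        · exact Or.inl h2
    · rw [if_neg hcont] at hval
      cases hval
  · rintro ⟨p, h1, h2, h3, h4⟩
    refine ⟨pvJoin ((cells.drop p).take w.length), ?_, by simpa [Bool.or_eq_true] using h4⟩
    rw [List.mem_filterMap]
    refine ⟨p, ?_, ?_⟩
    · by_cases hp0 : p = 0
      · subst hp0
        exact List.mem_cons_self
      · rcases h2 with h | h
        · exact absurd h hp0
        · refine List.mem_cons.mpr (Or.inr ?_)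
          rw [List.mem_map]
          exact ⟨p - 1, (mem_hashIdx0 _ _).mpr ⟨getD_hash_lt _ _ h, h⟩, by omega⟩
    · rw [if_pos]
      rw [List.contains_eq_mem, decide_eq_true_eq, List.mem_append, List.mem_singleton,
        mem_hashIdx0]
      rcases h3 with h | h
      · exact Or.inr h
      · by_cases hpl : p + w.length = cells.length
        · exact Or.inr hpl
        · exact Or.inl ⟨by omega, h⟩

lemma foldl_min_ge (n : Nat) : ∀ rs : List (List String), (∀ row ∈ rs, n ≤ row.length) →
    rs.foldl (fun k row => min k row.length) n = n := by
  intro rs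
  induction rs with
  | nil => intro _; rfl
  | cons r rs ih =>
    intro h
    simp only [List.foldl_cons, Nat.min_eq_left (h r (by simp))]
    exact ih (fun row hr => h row (by simp [hr]))

lemma zipStar_rect (board : List (List String)) (h0 : board ≠ [])
    (hlen : ∀ row ∈ board, (board.getD 0 []).length ≤ row.length) :
    pyZipStar board =
      (List.range (board.getD 0 []).length).map
        (fun j => board.map fun row => row.getD j "") := by
  cases board with
  | nil => exact absurd rfl h0
  | cons r rs =>
    show (List.range (rs.foldl (fun k row => min k row.length) r.length)).map _ = _
    rw [show ((r :: rs).getD 0 []) = r from rfl,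
      foldl_min_ge r.length rs (fun row hr => hlen row (by simp [hr]))]

theorem B_iff_slots (board : List (List String)) (word : String)
    (h0 : board ≠ [])
    (hlen : ∀ row ∈ board, (board.getD 0 []).length ≤ row.length) :
    placeWordInCrossword0_alt board word = true ↔
      ((∃ i, i < board.length ∧
          ∃ p, Slot word.toList ((board.getD i []).take (board.getD 0 []).length) p) ∨
       (∃ j, j < (board.getD 0 []).length ∧
          ∃ p, Slot word.toList (board.map fun r => r.getD j "") p)) := by
  set w := word.toList with hwdef
  set m := board.length with hm
  set n := (board.getD 0 []).length with hn
  have hrowmem : ∀ i, i < m → board.getD i [] ∈ board := by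
    intro i hi
    rw [List.getD_eq_getElem _ _ hi]
    exact List.getElem_mem hi
  have halt : placeWordInCrossword0_alt board word =
      ((((board.map fun row => row.take n) ++ pyZipStar board).flatMap fun cells =>
        pvLineSlots w.length cells).any fun seg => pvMatch seg w) := rfl
  rw [halt, List.flatMap_append, List.any_append, Bool.or_eq_true,
    zipStar_rect board h0 hlen, ← hn]
  have flat_iff : ∀ L : List (List String),
      ((L.flatMap fun cells => pvLineSlots w.length cells).any fun seg => pvMatch seg w) = true ↔
        ∃ cells ∈ L, ∃ p, Slot w cells p := by
    intro L
    rw [List.any_flatMap, List.any_eq_true]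
    constructor
    · rintro ⟨cells, hc, hp⟩
      exact ⟨cells, hc, (lineSlots_iff w cells).mp hp⟩
    · rintro ⟨cells, hc, hp⟩
      exact ⟨cells, hc, (lineSlots_iff w cells).mpr hp⟩
  rw [flat_iff, flat_iff]
  constructor
  · rintro (⟨cells, hc, hp⟩ | ⟨cells, hc, hp⟩)
    · left
      rw [List.mem_map] at hc
      obtain ⟨row, hrow, rfl⟩ := hc
      obtain ⟨i, hi, rfl⟩ := List.mem_iff_getElem.mp hrow
      rw [← hm] at hi
      refine ⟨i, hi, ?_⟩
      rw [List.getD_eq_getElem _ _ hi]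
      exact hp
    · right
      rw [List.mem_map] at hc
      obtain ⟨j, hj, rfl⟩ := hc
      rw [List.mem_range] at hj
      exact ⟨j, hj, hp⟩
  · rintro (⟨i, hi, hp⟩ | ⟨j, hj, hp⟩)
    · left
      refine ⟨(board.getD i []).take n, List.mem_map.mpr ⟨_, hrowmem i hi, rfl⟩, hp⟩
    · right
      exact ⟨board.map fun r => r.getD j "", List.mem_map.mpr ⟨j, List.mem_range.mpr hj, rfl⟩, hp⟩

-- ===== VERDICT (by name: the statement is the Claim_ definition above) =====
theorem placeWordInCrossword0_spec : Claim_equal_placeWordInCrossword0 := by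
  intro board word _ hpre
  unfold Spec_placeWordInCrossword0
  obtain ⟨h0, hlen, hnz⟩ := hpre
  rw [Bool.eq_iff_iff, A_iff_slots board word h0 hlen hnz, B_iff_slots board word h0 hlen]
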